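-- pv_equiv track=rewrite | github.com/DLamarG/Selective_Array_Reversing_CodeWars_Challenge | selective_array_reversing.py | sel_reverse
-- ===== SOURCE A (Python) =====
-- def sel_reverse(arr,l):
--     results = []
--     if(l==0):
--       return arr
--     count = 0
--     while count<=len(arr):
--       slice_object = slice(0+count,l+count)
--       sec = arr[slice_object]
--       rev = sec[::-1]
--       count += l
--       results.append(rev)
--       slice_object = ''
--     x = [b for sl in results for b in sl]
--     return x
-- ===== SOURCE B (Python) =====
-- def sel_reverse(arr, l):
--     # Reverse consecutive chunks of size l in place on a copy, two pointers per chunk.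
--     if l == 0:
--         return arr
--     res = list(arr)
--     n = len(res)
--     for start in range(0, n, l):
--         i = start
--         j = min(start + l, n) - 1
--         while i < j:
--             res[i], res[j] = res[j], res[i]
--             i += 1
--             j -= 1
--     return res
-- ===== Notes on version B (the rewrite author's own statement) =====
-- stated objective: alternative
-- what changed: B reverses each length-l chunk in place on a single copy with two index pointers instead of slicing out each chunk, reversing it, collecting the pieces and flattening them; no intermediate sublists are built.
import Mathlib
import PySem

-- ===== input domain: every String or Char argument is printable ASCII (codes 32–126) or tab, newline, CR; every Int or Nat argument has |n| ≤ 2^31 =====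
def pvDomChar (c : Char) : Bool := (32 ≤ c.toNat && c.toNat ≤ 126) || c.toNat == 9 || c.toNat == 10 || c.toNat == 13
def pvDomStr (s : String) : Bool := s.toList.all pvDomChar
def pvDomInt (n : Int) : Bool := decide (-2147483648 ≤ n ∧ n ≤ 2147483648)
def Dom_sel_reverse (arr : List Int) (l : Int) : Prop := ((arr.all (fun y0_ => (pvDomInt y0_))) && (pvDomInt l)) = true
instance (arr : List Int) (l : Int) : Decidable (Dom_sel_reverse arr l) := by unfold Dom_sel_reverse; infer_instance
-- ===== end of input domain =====

-- B reverses each length-l chunk in place on a copy with two index pointers instead of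
-- slicing, reversing and flattening sublists (alternative decomposition, same cost).

-- ===== PORT A =====
-- the while loop; fuel only makes the recursion total (it never runs out when 1 ≤ l,
-- which Pre_ guarantees: each iteration with count ≤ len advances count by l ≥ 1)
def selA_loop (arr : List Int) (l : Int) : Nat → Int → List (List Int) → List (List Int)
  | 0, _, results => results
  | fuel + 1, count, results =>
    if count ≤ (arr.length : Int) then
      let sec := PySem.List.slice arr (some (0 + count)) (some (l + count))
      let rev := sec.reverse  -- sec[::-1], cf. PySem.List.slice?_none_none_neg_one
      selA_loop arr l fuel (count + l) (results ++ [rev])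
    else results

def sel_reverse (arr : List Int) (l : Int) : List Int :=
  if l == 0 then arr
  else
    let results := selA_loop arr l (arr.length + 2) 0 []
    results.flatMap (fun sl => sl)   -- [b for sl in results for b in sl]

-- ===== PORT B =====
-- while i < j: res[i], res[j] = res[j], res[i]; i += 1; j -= 1
-- (i, j are always in range when the body runs; .getD 0 is never the returned branch)
def swapLoop (res : List Int) (i j : Int) : List Int :=
  if i < j then
    let a := (PySem.List.pyGet? res i).getD 0
    let b := (PySem.List.pyGet? res j).getD 0
    swapLoop ((res.set i.toNat b).set j.toNat a) (i + 1) (j - 1)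
  else res
termination_by (j - i).toNat
decreasing_by simp_wf; omega

def sel_reverse_alt (arr : List Int) (l : Int) : List Int :=
  if l == 0 then arr
  else
    let n : Int := arr.length
    (PySem.List.pyRange 0 n l).foldl
      (fun res start => swapLoop res start (min (start + l) n - 1)) arr

-- ===== PRECONDITION & SPEC =====
-- Pre_ excludes negative l, on which A's while loop never terminates (count only decreases).
def Pre_sel_reverse (_arr : List Int) (l : Int) : Prop := 0 ≤ l
instance (arr : List Int) (l : Int) : Decidable (Pre_sel_reverse arr l) := by unfold Pre_sel_reverse; infer_instance
def pvWitness_sel_reverse : List Int × Int := ([1, 2, 3, 4, 5], 2)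

def Spec_sel_reverse (arr : List Int) (l : Int) (out : List Int) : Prop := out = sel_reverse_alt arr l
instance (arr : List Int) (l : Int) (out : List Int) : Decidable (Spec_sel_reverse arr l out) := by unfold Spec_sel_reverse; infer_instance

-- ===== CLAIM (what is proved, stated in full; the proofs are below) =====
def Claim_equal_sel_reverse : Prop := ∀ (arr : List Int) (l : Int), Dom_sel_reverse arr l → Pre_sel_reverse arr l → Spec_sel_reverse arr l (sel_reverse arr l)

-- ===== LEMMAS AND PROOFS =====

def chunkRev : Nat → List Int → List Int
  | _, [] => []
  | l, x :: rest => ((x :: rest).take l).reverse ++ chunkRev l (rest.drop (l - 1))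
termination_by _ xs => xs.length
decreasing_by simp_wf

theorem chunkRev_cons (l : Nat) (hl : 1 ≤ l) (x : Int) (rest : List Int) :
    chunkRev l (x :: rest) = ((x :: rest).take l).reverse ++ chunkRev l ((x :: rest).drop l) := by
  conv_lhs => rw [chunkRev.eq_def]
  obtain ⟨l', rfl⟩ : ∃ l', l = l' + 1 := ⟨l - 1, by omega⟩
  simp

theorem selA_loop_stop (arr : List Int) (l : Int) (fuel : Nat) (count : Int)
    (results : List (List Int)) (h : (arr.length : Int) < count) :
    selA_loop arr l fuel count results = results := by
  cases fuel with
  | zero => rfl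
  | succ f => rw [selA_loop]; rw [if_neg (by omega)]

theorem selA_loop_eq (arr : List Int) (l : Int) (hl : 1 ≤ l) :
    ∀ (fuel : Nat) (count : Int) (results : List (List Int)),
      0 ≤ count → (arr.drop count.toNat).length < fuel →
      (selA_loop arr l fuel count results).flatMap (fun sl => sl) =
        results.flatMap (fun sl => sl) ++ chunkRev l.toNat (arr.drop count.toNat) := by
  intro fuel
  induction fuel with
  | zero => intro count results _ h; omega
  | succ f ih =>
    intro count results hc0 hlen
    rw [selA_loop]
    by_cases hc : count ≤ (arr.length : Int)
    · rw [if_pos hc]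
      have hsec : PySem.List.slice arr (some (0 + count)) (some (l + count)) =
          (arr.drop count.toNat).take l.toNat := by
        rw [zero_add, PySem.List.slice_toNat arr hc0 (by omega)]
        congr 1; omega
      rcases hrem : arr.drop count.toNat with _ | ⟨x, rest⟩
      · have hcnt : (arr.length : Int) < count + l := by
          have := List.drop_eq_nil_iff.mp hrem; omega
        rw [selA_loop_stop arr l f _ _ hcnt]
        simp [PySem.List.slice_toNat arr hc0 (show (0:Int) ≤ l + count by omega), hrem, chunkRev]
      · have hdl : (arr.drop count.toNat).length = rest.length + 1 := by rw [hrem]; simp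
        have hdrop2 : arr.drop (count + l).toNat = (arr.drop count.toNat).drop l.toNat := by
          rw [List.drop_drop]; congr 1; omega
        rw [ih (count + l) _ (by omega)
          (by rw [hdrop2, List.length_drop, hdl]; omega)]
        rw [hsec, hdrop2, hrem, chunkRev_cons l.toNat (by omega) x rest]
        simp
    · rw [if_neg hc]
      have : arr.drop count.toNat = [] := by
        apply List.drop_eq_nil_iff.mpr; omega
      simp [this, chunkRev]

theorem pyGet?_append_cons (p t : List Int) (a : Int) :
    PySem.List.pyGet? (p ++ a :: t) (p.length) = some a := by
  simp [PySem.List.pyGet?, PySem.List.pyIdx?]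

theorem set_append_cons (p t : List Int) (x y : Int) :
    (p ++ x :: t).set p.length y = p ++ y :: t := by
  simp

theorem swapLoop_reverses (mid : List Int) :
    ∀ (p s : List Int),
      swapLoop (p ++ mid ++ s) (p.length) ((p.length : Int) + mid.length - 1) =
        p ++ mid.reverse ++ s := by
  induction mid using List.bidirectionalRec with
  | nil => intro p s; rw [swapLoop]; simp
  | singleton a => intro p s; rw [swapLoop]; simp
  | cons_append a m b ih =>
    intro p s
    rw [swapLoop]
    rw [if_pos (by simp; omega)]
    have h1 : PySem.List.pyGet? (p ++ (a :: (m ++ [b])) ++ s) ((p.length : Int)) = some a := by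
      simpa using pyGet?_append_cons p (m ++ ([b] ++ s)) a
    have hj : (p.length : Int) + ((a :: (m ++ [b])).length : Int) - 1 = (((p ++ a :: m).length : Int)) := by
      simp; push_cast; ring
    have h3 : PySem.List.pyGet? (p ++ (a :: (m ++ [b])) ++ s) ((p.length : Int) + ((a :: (m ++ [b])).length : Int) - 1) = some b := by
      rw [hj, show (p ++ (a :: (m ++ [b])) ++ s) = (p ++ a :: m) ++ b :: s by simp]
      exact pyGet?_append_cons (p ++ a :: m) s b
    simp only [h1, h3, Option.getD_some]
    rw [show (p ++ a :: (m ++ [b]) ++ s) = p ++ a :: (m ++ b :: s) by simp,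
        Int.toNat_natCast, set_append_cons]
    rw [show ((p.length : Int) + ((a :: (m ++ [b])).length : Int) - 1).toNat = (p ++ b :: m).length by simp; omega,
        show p ++ b :: (m ++ b :: s) = (p ++ b :: m) ++ b :: s by simp, set_append_cons]
    rw [show (p ++ b :: m) ++ a :: s = (p ++ [b]) ++ m ++ (a :: s) by simp,
        show ((p.length : Int) + 1) = ((p ++ [b]).length : Int) by simp,
        show ((p.length : Int) + ((a :: (m ++ [b])).length : Int) - 1 - 1) = ((p ++ [b]).length : Int) + (m.length : Int) - 1 by simp; omega,
        ih]
    simp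

theorem pyRange_pos_nil (a b s : Int) (hs : 0 < s) (h : b ≤ a) :
    PySem.List.pyRange a b s = [] := by
  rw [PySem.List.pyRange_of_pos a b hs, if_neg (by omega)]
  simp

theorem pyRange_pos_cons (a b s : Int) (hs : 0 < s) (h : a < b) :
    PySem.List.pyRange a b s = a :: PySem.List.pyRange (a + s) b s := by
  rw [PySem.List.pyRange_of_pos a b hs, PySem.List.pyRange_of_pos (a + s) b hs]
  have hdiv : (b - a + s - 1) / s = (b - a - 1) / s + 1 := by
    have h1 := Int.add_mul_ediv_right (b - a - 1) 1 (ne_of_gt hs)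
    rw [one_mul] at h1
    rw [show b - a + s - 1 = b - a - 1 + s by ring, h1]
  have hnn : 0 ≤ (b - a - 1) / s := Int.ediv_nonneg (by omega) (by omega)
  have key : ((b - a + s - 1) / s).toNat =
      (if a + s < b then ((b - (a + s) + s - 1) / s).toNat else 0) + 1 := by
    by_cases hc : a + s < b
    · rw [if_pos hc, show b - (a + s) + s - 1 = b - a - 1 by ring]
      omega
    · rw [if_neg hc]
      have h0 : (b - a - 1) / s = 0 :=
        Int.ediv_eq_zero_of_lt (by omega) (by omega)
      omega
  rw [if_pos h, key, List.range_succ_eq_map]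
  simp only [List.map_cons, List.map_map]
  refine List.cons_eq_cons.mpr ⟨by simp, ?_⟩
  apply List.map_congr_left
  intro k _
  simp [Function.comp]
  push_cast
  ring

theorem foldB_eq (l : Int) (hl : 1 ≤ l) (n : Int) :
    ∀ (k : Nat) (xs p : List Int), xs.length ≤ k → n = p.length + xs.length →
      (PySem.List.pyRange (p.length) n l).foldl
        (fun res start => swapLoop res start (min (start + l) n - 1)) (p ++ xs)
      = p ++ chunkRev l.toNat xs := by
  intro k
  induction k with
  | zero =>
    intro xs p hk hn
    have hxs : xs = [] := by cases xs <;> simp_all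
    subst hxs
    rw [pyRange_pos_nil _ _ _ (by omega) (by simp at hn; omega)]
    simp [chunkRev]
  | succ k ih =>
    intro xs p hk hn
    rcases xs with _ | ⟨x, rest⟩
    · rw [pyRange_pos_nil _ _ _ (by omega) (by simp at hn; omega)]
      simp [chunkRev]
    · rw [pyRange_pos_cons _ _ _ (by omega) (by simp at hn; omega)]
      rw [List.foldl_cons]
      set xs := x :: rest with hxs
      set mid := xs.take l.toNat with hmid
      set suf := xs.drop l.toNat with hsuf
      have hmlen : mid.length = min l.toNat xs.length := by rw [hmid]; simp
      have hslen : suf.length = xs.length - l.toNat := by rw [hsuf]; simp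
      have hsplit : p ++ xs = p ++ mid ++ suf := by rw [hmid, hsuf]; simp
      have hminIdx : min ((p.length : Int) + l) n - 1 = (p.length : Int) + mid.length - 1 := by
        rw [hn]; omega
      rw [hsplit, hminIdx, swapLoop_reverses mid p suf]
      by_cases hbig : l.toNat < xs.length
      · have hplen : ((p ++ mid.reverse).length : Int) = (p.length : Int) + l := by
          simp [hmlen]; omega
        have hassoc : p ++ mid.reverse ++ suf = (p ++ mid.reverse) ++ suf := by simp
        rw [show (p.length : Int) + l = ((p ++ mid.reverse).length : Int) from hplen.symm]
        rw [ih suf (p ++ mid.reverse) (by omega) (by simp [hmlen]; omega)]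
        rw [hxs, chunkRev_cons l.toNat (by omega) x rest, ← hxs, ← hmid, ← hsuf]
        simp
      · have hsufnil : suf = [] := by rw [hsuf]; apply List.drop_eq_nil_iff.mpr; omega
        rw [pyRange_pos_nil _ _ _ (by omega) (by rw [hn]; omega)]
        rw [hxs, chunkRev_cons l.toNat (by omega) x rest, ← hxs, ← hmid, ← hsuf, hsufnil]
        simp
        rw [chunkRev.eq_def]

theorem selA_eq (arr : List Int) (l : Int) (hl : 1 ≤ l) :
    sel_reverse arr l = chunkRev l.toNat arr := by
  have h0 : (l == 0) = false := by simp; omega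
  simp only [sel_reverse, h0, Bool.false_eq_true, if_false]
  have h := selA_loop_eq arr l hl (arr.length + 2) 0 [] (by omega) (by simp)
  simpa using h

theorem selB_eq (arr : List Int) (l : Int) (hl : 1 ≤ l) :
    sel_reverse_alt arr l = chunkRev l.toNat arr := by
  have h0 : (l == 0) = false := by simp; omega
  simp only [sel_reverse_alt, h0, Bool.false_eq_true, if_false]
  have h := foldB_eq l hl (arr.length) arr.length arr [] (le_refl _) (by simp)
  simpa using h

-- ===== VERDICT (by name: the statement is the Claim_ definition above) =====
theorem sel_reverse_spec : Claim_equal_sel_reverse := by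
  intro arr l _ hpre
  unfold Spec_sel_reverse
  by_cases h0 : l = 0
  · subst h0; simp [sel_reverse, sel_reverse_alt]
  · have hl : 1 ≤ l := by unfold Pre_sel_reverse at hpre; omega
    rw [selA_eq arr l hl, selB_eq arr l hl]
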